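-- pv_equiv track=rewrite | github.com/basmulder03/AdventOfCodePython | 2017/day21.py | get_all_variations
-- ===== SOURCE A (Python) =====
-- def rotate_pattern(pattern):
--     """Rotate pattern 90 degrees clockwise."""
--     size = len(pattern)
--     return [''.join(pattern[size-1-j][i] for j in range(size)) for i in range(size)]
--
-- def flip_pattern(pattern):
--     """Flip pattern horizontally."""
--     return [row[::-1] for row in pattern]
--
-- def get_all_variations(pattern):
--     """Get all 8 possible rotations and flips of a pattern."""
--     variations = set()
--     current = pattern[:]
--
--     for _ in range(4):
--         variations.add('/'.join(current))
--         variations.add('/'.join(flip_pattern(current)))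
--         current = rotate_pattern(current)
--
--     return variations
-- ===== SOURCE B (Python) =====
-- def get_all_variations(pattern):
--     """Get all 8 possible rotations and flips of a pattern.
--
--     Enumerates the 8 dihedral symmetries directly as index mappings over the
--     original pattern instead of iteratively re-rotating a working copy.
--     """
--     n = len(pattern)
--
--     def build(f):
--         return '/'.join(''.join(f(i, j) for j in range(n)) for i in range(n))
--
--     out = set()
--     out.add('/'.join(pattern))                              # identity
--     out.add('/'.join(row[::-1] for row in pattern))         # horizontal flip
--     out.add(build(lambda i, j: pattern[n - 1 - j][i]))      # rotate 90 cw
--     out.add(build(lambda i, j: pattern[j][i]))              # transpose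
--     out.add(build(lambda i, j: pattern[n - 1 - i][n - 1 - j]))  # rotate 180
--     out.add(build(lambda i, j: pattern[n - 1 - i][j]))      # vertical flip
--     out.add(build(lambda i, j: pattern[j][n - 1 - i]))      # rotate 270 cw
--     out.add(build(lambda i, j: pattern[n - 1 - j][n - 1 - i]))  # anti-transpose
--     return out
-- ===== Notes on version B (the rewrite author's own statement) =====
-- stated objective: alternative
-- what changed: Instead of maintaining a working copy and re-rotating it four times (building three intermediate grids), B enumerates the 8 dihedral symmetries directly as closed-form index mappings applied to the original pattern.
import Mathlib
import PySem

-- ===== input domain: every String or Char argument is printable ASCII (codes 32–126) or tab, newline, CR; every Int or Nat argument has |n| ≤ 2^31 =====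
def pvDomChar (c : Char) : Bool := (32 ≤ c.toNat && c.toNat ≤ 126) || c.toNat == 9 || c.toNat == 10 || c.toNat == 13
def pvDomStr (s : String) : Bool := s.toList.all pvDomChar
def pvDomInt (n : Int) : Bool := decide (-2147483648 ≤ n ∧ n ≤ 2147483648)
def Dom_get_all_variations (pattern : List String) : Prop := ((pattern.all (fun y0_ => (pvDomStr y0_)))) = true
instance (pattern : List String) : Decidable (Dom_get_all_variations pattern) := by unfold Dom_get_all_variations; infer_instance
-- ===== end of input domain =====

-- B enumerates the 8 dihedral transforms directly from the original pattern instead of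
-- iteratively re-rotating a working copy (objective: alternative decomposition, same cost).

-- ===== PORT A =====
-- pattern[size-1-j][i]: the IndexError cases (a row shorter than the pattern) are excluded
-- by Pre_get_all_variations; the .getD defaults are never reached there.
def rotate_pattern (pattern : List String) : List String :=
  let size := pattern.length
  (List.range size).map (fun (i : Nat) =>
    String.ofList ((List.range size).map (fun (j : Nat) =>
      (PySem.Str.pyGet? ((PySem.List.pyGet? pattern ((size : Int) - 1 - (j : Int))).getD "")
        (i : Int)).getD ' ')))

def flip_pattern (pattern : List String) : List String :=
  pattern.map (fun row => (PySem.Str.slice? row none none (-1)).getD "")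

def get_all_variations (pattern : List String) : List String :=
  let variations : PySem.Set String := PySem.Set.empty
  let current := pattern          -- pattern[:]
  let st := (List.range 4).foldl
    (fun (st : PySem.Set String × List String) _ =>
      let v := PySem.Set.add st.1 (PySem.Str.join "/" st.2)
      let v := PySem.Set.add v (PySem.Str.join "/" (flip_pattern st.2))
      (v, rotate_pattern st.2))
    (variations, current)
  st.1

-- ===== PORT B =====
-- pattern[i][j] (raises excluded by Pre_, as in port A)
def pvGetC (pattern : List String) (i j : Int) : Char :=
  (PySem.Str.pyGet? ((PySem.List.pyGet? pattern i).getD "") j).getD ' '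

def pvBuild (n : Nat) (f : Nat → Nat → Char) : String :=
  PySem.Str.join "/" ((List.range n).map (fun i =>
    String.ofList ((List.range n).map (fun j => f i j))))

def get_all_variations_alt (pattern : List String) : List String :=
  let n := pattern.length
  PySem.Set.ofList
    [ PySem.Str.join "/" pattern,                                                        -- identity
      PySem.Str.join "/" (pattern.map (fun row => (PySem.Str.slice? row none none (-1)).getD "")),  -- horizontal flip
      pvBuild n (fun i j => pvGetC pattern ((n : Int) - 1 - (j : Int)) (i : Int)),       -- rotate 90 cw
      pvBuild n (fun i j => pvGetC pattern (j : Int) (i : Int)),                         -- transpose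
      pvBuild n (fun i j => pvGetC pattern ((n : Int) - 1 - (i : Int)) ((n : Int) - 1 - (j : Int))),  -- rotate 180
      pvBuild n (fun i j => pvGetC pattern ((n : Int) - 1 - (i : Int)) (j : Int)),       -- vertical flip
      pvBuild n (fun i j => pvGetC pattern (j : Int) ((n : Int) - 1 - (i : Int))),       -- rotate 270 cw
      pvBuild n (fun i j => pvGetC pattern ((n : Int) - 1 - (j : Int)) ((n : Int) - 1 - (i : Int))) ]  -- anti-transpose

-- ===== PRECONDITION & SPEC =====
-- Python A raises IndexError (in rotate_pattern) exactly when some row is shorter than the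
-- number of rows; Pre_ excludes those inputs (A returns normally on every other input).
def Pre_get_all_variations (pattern : List String) : Prop :=
  ∀ s ∈ pattern, pattern.length ≤ s.toList.length
instance (pattern : List String) : Decidable (Pre_get_all_variations pattern) := by
  unfold Pre_get_all_variations; infer_instance

def pvWitness_get_all_variations : List String := ["#.", ".#"]

def Spec_get_all_variations (pattern : List String) (out : List String) : Prop := out = get_all_variations_alt pattern
instance (pattern : List String) (out : List String) : Decidable (Spec_get_all_variations pattern out) := by unfold Spec_get_all_variations; infer_instance

-- ===== CLAIM (what is proved, stated in full; the proofs are below) =====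
def Claim_equal_get_all_variations : Prop := ∀ (pattern : List String), Dom_get_all_variations pattern → Pre_get_all_variations pattern → Spec_get_all_variations pattern (get_all_variations pattern)

-- ===== LEMMAS AND PROOFS =====

-- a square grid given by a char function; rotate_pattern/flip_pattern act on it by index remapping
def mkG (n : Nat) (h : Nat → Nat → Char) : List String :=
  (List.range n).map (fun i => String.ofList ((List.range n).map (fun j => h i j)))

theorem mkG_congr {n : Nat} {f g : Nat → Nat → Char}
    (h : ∀ i < n, ∀ j < n, f i j = g i j) : mkG n f = mkG n g := by
  unfold mkG
  refine List.map_congr_left (fun i hi => ?_)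
  rw [List.mem_range] at hi
  exact congrArg _ (List.map_congr_left (fun j hj => h i hi j (List.mem_range.mp hj)))

theorem rev_range_map {α : Type} (n : Nat) (f : Nat → α) :
    ((List.range n).map f).reverse = (List.range n).map (fun j => f (n - 1 - j)) := by
  apply List.ext_getElem
  · simp
  · intro k h1 h2
    simp only [List.getElem_reverse, List.getElem_map, List.getElem_range,
      List.length_map, List.length_range] at *

theorem rotate_mkG (n : Nat) (h : Nat → Nat → Char) :
    rotate_pattern (mkG n h) = mkG n (fun i j => h (n - 1 - j) i) := by
  unfold rotate_pattern mkG
  simp only [List.length_map, List.length_range]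
  refine List.map_congr_left (fun i hi => ?_)
  rw [List.mem_range] at hi
  refine congrArg _ (List.map_congr_left (fun j hj => ?_))
  rw [List.mem_range] at hj
  have hc : (n : Int) - 1 - (j : Int) = ((n - 1 - j : Nat) : Int) := by omega
  rw [hc, PySem.List.pyGet?_natCast]
  simp [hi, show n - 1 - j < n by omega]

theorem flip_mkG (n : Nat) (h : Nat → Nat → Char) :
    flip_pattern (mkG n h) = mkG n (fun i j => h i (n - 1 - j)) := by
  unfold flip_pattern mkG
  simp only [List.map_map]
  refine List.map_congr_left (fun i hi => ?_)
  simp only [Function.comp]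
  rw [PySem.Str.slice?_none_none_neg_one]
  simp [rev_range_map]

set_option maxHeartbeats 1000000 in
theorem get_all_variations_spec : Claim_equal_get_all_variations := by
  intro pattern _ _
  unfold Spec_get_all_variations
  show get_all_variations pattern = get_all_variations_alt pattern
  -- the four successive values of `current` in A's loop, as index maps over the original pattern
  have h1 : rotate_pattern pattern
      = mkG pattern.length
          (fun i j => pvGetC pattern ((pattern.length : Int) - 1 - (j : Int)) (i : Int)) := by
    unfold rotate_pattern mkG pvGetC; rfl
  have h2 : rotate_pattern (rotate_pattern pattern)
      = mkG pattern.length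
          (fun i j => pvGetC pattern ((pattern.length : Int) - 1 - (i : Int))
            ((pattern.length : Int) - 1 - (j : Int))) := by
    rw [h1, rotate_mkG]
    exact mkG_congr (fun i hi j hj => by
      rw [show ((pattern.length - 1 - j : Nat) : Int)
            = (pattern.length : Int) - 1 - (j : Int) by omega])
  have h3 : rotate_pattern (rotate_pattern (rotate_pattern pattern))
      = mkG pattern.length
          (fun i j => pvGetC pattern (j : Int) ((pattern.length : Int) - 1 - (i : Int))) := by
    rw [h2, rotate_mkG]
    exact mkG_congr (fun i hi j hj => by
      rw [show ((pattern.length : Int) - 1 - ((pattern.length - 1 - j : Nat) : Int))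
            = (j : Int) by omega])
  have f1 : flip_pattern (rotate_pattern pattern)
      = mkG pattern.length (fun i j => pvGetC pattern (j : Int) (i : Int)) := by
    rw [h1, flip_mkG]
    exact mkG_congr (fun i hi j hj => by
      rw [show ((pattern.length : Int) - 1 - ((pattern.length - 1 - j : Nat) : Int))
            = (j : Int) by omega])
  have f2 : flip_pattern (rotate_pattern (rotate_pattern pattern))
      = mkG pattern.length
          (fun i j => pvGetC pattern ((pattern.length : Int) - 1 - (i : Int)) (j : Int)) := by
    rw [h2, flip_mkG]
    exact mkG_congr (fun i hi j hj => by
      rw [show ((pattern.length : Int) - 1 - ((pattern.length - 1 - j : Nat) : Int))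
            = (j : Int) by omega])
  have f3 : flip_pattern (rotate_pattern (rotate_pattern (rotate_pattern pattern)))
      = mkG pattern.length
          (fun i j => pvGetC pattern ((pattern.length : Int) - 1 - (j : Int))
            ((pattern.length : Int) - 1 - (i : Int))) := by
    rw [h3, flip_mkG]
    exact mkG_congr (fun i hi j hj => by
      rw [show ((pattern.length - 1 - j : Nat) : Int)
            = (pattern.length : Int) - 1 - (j : Int) by omega])
  -- unfold A's 4-iteration loop into the chain of eight Set.add's, then rewrite each string
  simp only [get_all_variations, List.range, List.range.loop, List.foldl]
  rw [f3, h3, f2, h2, f1, h1]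
  unfold get_all_variations_alt pvBuild
  rw [PySem.Set.ofList_eq_foldl]
  simp only [List.foldl]
  rfl
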